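-- pv_equiv track=rewrite | github.com/nordcap/stepik | Stepik-Введение в Python (7-8 классы)/3 Структуры данных/3.1 Словари/task_9.py | offer_me
-- ===== SOURCE A (Python) =====
-- def offer_me(arr_union_books, dict_user_read):
--     # выдача предложения по условию - книга не должна прочитана ранее
--     arr_read = parse_list(list(dict_user_read.values()))
--     arr_result = []
--     for book in arr_union_books:
--         if book in arr_read:
--             continue
--         else:
--             arr_result.append(book)
--
--     return arr_result
--
-- def parse_list(input_array):
--     # конвертация вложенных списков в односвязный
--     result_array = []
--     for array_item in input_array:
--         if isinstance(array_item, list) or isinstance(array_item, tuple):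
--             result_array.extend(parse_list(array_item))
--         else:
--             result_array.append(array_item)
--     return result_array
-- ===== SOURCE B (Python) =====
-- def offer_me(arr_union_books, dict_user_read):
--     # Build, in one pass, a hash set of all read books; then filter in O(1) per book.
--     read = set()
--     for books in dict_user_read.values():
--         read.update(books)
--     return [book for book in arr_union_books if book not in read]
-- ===== Notes on version B (the rewrite author's own statement) =====
-- stated objective: faster
-- what changed: Replaces the recursive nested-list flattening plus linear 'in'-list scan per book with a hash set built in one pass over the dict values and an O(1) membership test inside a single comprehension.
import Mathlib
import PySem

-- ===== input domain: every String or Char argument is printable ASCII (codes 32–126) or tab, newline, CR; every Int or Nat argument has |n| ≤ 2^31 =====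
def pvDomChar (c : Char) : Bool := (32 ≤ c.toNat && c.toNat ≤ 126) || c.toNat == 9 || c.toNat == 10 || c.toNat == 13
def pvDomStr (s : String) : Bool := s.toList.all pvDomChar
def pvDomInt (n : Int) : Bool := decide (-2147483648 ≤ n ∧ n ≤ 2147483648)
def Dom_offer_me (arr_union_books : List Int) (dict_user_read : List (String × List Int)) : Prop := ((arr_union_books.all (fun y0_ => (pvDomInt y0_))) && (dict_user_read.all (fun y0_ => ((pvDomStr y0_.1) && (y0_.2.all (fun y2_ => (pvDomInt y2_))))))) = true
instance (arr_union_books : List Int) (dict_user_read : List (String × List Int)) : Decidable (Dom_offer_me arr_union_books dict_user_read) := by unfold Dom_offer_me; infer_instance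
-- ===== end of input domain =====

-- B replaces A's recursive flatten + per-book linear scan by a set built in one pass and a filter (faster).

-- ===== PORT A =====
-- parse_list: here dict values are lists of ints, so the outer call extends with the
-- recursive call on each list value, and the inner call appends each int atom.
def parse_list_inner (input_array : List Int) : List Int :=
  input_array.foldl (fun result_array array_item => result_array ++ [array_item]) []

def parse_list (input_array : List (List Int)) : List Int :=
  input_array.foldl (fun result_array array_item => result_array ++ parse_list_inner array_item) []

def offer_me (arr_union_books : List Int) (dict_user_read : List (String × List Int)) : List Int :=
  let arr_read := parse_list (PySem.Dict.values (PySem.Dict.mk dict_user_read))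
  arr_union_books.foldl
    (fun arr_result book => if arr_read.contains book then arr_result else arr_result ++ [book]) []

-- ===== PORT B =====
def offer_me_alt (arr_union_books : List Int) (dict_user_read : List (String × List Int)) : List Int :=
  let read : PySem.Set Int :=
    (PySem.Dict.values (PySem.Dict.mk dict_user_read)).foldl (fun s books => PySem.Set.update s books) PySem.Set.empty
  arr_union_books.filter (fun book => !(PySem.Set.contains read book))

-- ===== PRECONDITION & SPEC =====
def Spec_offer_me (arr_union_books : List Int) (dict_user_read : List (String × List Int)) (out : List Int) : Prop := out = offer_me_alt arr_union_books dict_user_read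
instance (arr_union_books : List Int) (dict_user_read : List (String × List Int)) (out : List Int) : Decidable (Spec_offer_me arr_union_books dict_user_read out) := by unfold Spec_offer_me; infer_instance

-- ===== CLAIM (what is proved, stated in full; the proofs are below) =====
def Claim_equal_offer_me : Prop := ∀ (arr_union_books : List Int) (dict_user_read : List (String × List Int)), Dom_offer_me arr_union_books dict_user_read → Spec_offer_me arr_union_books dict_user_read (offer_me arr_union_books dict_user_read)

-- ===== LEMMAS AND PROOFS =====

theorem parse_list_inner_eq (xs : List Int) : parse_list_inner xs = xs := by
  have h : ∀ (l acc : List Int),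
      l.foldl (fun result_array array_item => result_array ++ [array_item]) acc = acc ++ l := by
    intro l
    induction l with
    | nil => simp [List.foldl]
    | cons x t ih => intro acc; simp [List.foldl, ih]
  exact (h xs []).trans (List.nil_append xs)

theorem parse_list_eq (vs : List (List Int)) : parse_list vs = vs.flatten := by
  have h : ∀ (l : List (List Int)) (acc : List Int),
      l.foldl (fun result_array array_item => result_array ++ parse_list_inner array_item) acc
        = acc ++ l.flatten := by
    intro l
    induction l with
    | nil => simp [List.foldl]
    | cons x t ih => intro acc; rw [List.foldl, ih, parse_list_inner_eq]; simp
  unfold parse_list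
  exact (h vs []).trans (List.nil_append _)

theorem mem_read_set (vs : List (List Int)) (s : PySem.Set Int) (b : Int) :
    b ∈ vs.foldl (fun s books => PySem.Set.update s books) s ↔ b ∈ s ∨ b ∈ vs.flatten := by
  induction vs generalizing s with
  | nil => simp [List.foldl]
  | cons x t ih =>
    simp only [List.foldl, List.flatten_cons, List.mem_append]
    rw [ih]
    simp [PySem.Set.mem_update]
    tauto

theorem foldl_skip_eq_filter (p : Int → Bool) (l acc : List Int) :
    l.foldl (fun arr_result book => if p book then arr_result else arr_result ++ [book]) acc
      = acc ++ l.filter (fun book => !p book) := by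
  induction l generalizing acc with
  | nil => simp [List.foldl]
  | cons x t ih =>
    simp only [List.foldl, List.filter]
    by_cases h : p x <;> simp [h, ih]

theorem contains_eq (vs : List (List Int)) (b : Int) :
    (vs.flatten).contains b
      = PySem.Set.contains (vs.foldl (fun s books => PySem.Set.update s books) PySem.Set.empty) b := by
  have h := mem_read_set vs PySem.Set.empty b
  simp only [PySem.Set.empty, List.not_mem_nil, false_or] at h
  simp [PySem.Set.contains, h]

-- ===== VERDICT (by name: the statement is the Claim_ definition above) =====
theorem offer_me_spec : Claim_equal_offer_me := by
  intro arr d _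
  show offer_me arr d = offer_me_alt arr d
  unfold offer_me offer_me_alt
  rw [foldl_skip_eq_filter, List.nil_append]
  apply List.filter_congr
  intro b _
  rw [parse_list_eq, contains_eq]
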